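-- pv_equiv track=rewrite | github.com/JunInMay/journey-to-baekjoon | baekjoon/baekjoon_16862.py | get_abbreviation
-- ===== SOURCE A (Python) =====
-- letters_to_be_substituted = {
--     'at':'@',
--     'and':'&',
--     'one':'1',
--     'won':'1',
--     'to':'2',
--     'too':'2',
--     'two':'2',
--     'for':'4',
--     'four':'4',
--     'bea':'b',
--     'be':'b',
--     'bee':'b',
--     'sea':'c',
--     'see':'c',
--     'eye':'i',
--     'oh':'o',
--     'owe':'o',
--     'are':'r',
--     'you':'u',
--     'why':'y'
-- }
--
-- def get_abbreviation(temp_letters, candidates):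
--     result = temp_letters
--     abbreviated_number = 0
--
--     for i in range(min(3, len(candidates))):
--         # 탐색한 문자를 붙인다.
--         temp_letters += candidates[i]
--         # 붙인 문자가 축약어 테이블에 존재할 경우 임시로 축약어를 기록하고, 축약된 개수를 기록해준다.
--         # 더 긴 축약어가 있다면 더 긴 축약어로 덮어쓴다.
--         if letters_to_be_substituted.get(temp_letters.lower(), False):
--             result = letters_to_be_substituted[temp_letters.lower()]
--             # 대문자로 시작할 경우
--             if temp_letters[0].isupper():
--                 result = result.upper()
--             abbreviated_number = len(temp_letters)-1
--
--     return result, abbreviated_number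
-- ===== SOURCE B (Python) =====
-- letters_to_be_substituted = {
--     'at':'@',
--     'and':'&',
--     'one':'1',
--     'won':'1',
--     'to':'2',
--     'too':'2',
--     'two':'2',
--     'for':'4',
--     'four':'4',
--     'bea':'b',
--     'be':'b',
--     'bee':'b',
--     'sea':'c',
--     'see':'c',
--     'eye':'i',
--     'oh':'o',
--     'owe':'o',
--     'are':'r',
--     'you':'u',
--     'why':'y'
-- }
--
-- def get_abbreviation(temp_letters, candidates):
--     # Longest match wins in the original's overwrite loop, so scan lengths
--     # longest-first and return on the first hit.
--     for n in range(min(3, len(candidates)), 0, -1):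
--         s = temp_letters + ''.join(candidates[:n])
--         value = letters_to_be_substituted.get(s.lower(), "")
--         if value:
--             if s[0].isupper():
--                 value = value.upper()
--             return value, len(s) - 1
--     return temp_letters, 0
-- ===== Notes on version B (the rewrite author's own statement) =====
-- stated objective: alternative
-- what changed: B replaces A's forward accumulate-and-overwrite loop (result overwritten on each longer hit) with a longest-first scan over prefix lengths that returns on the first table hit, building each candidate prefix with ''.join instead of repeated in-place accumulation.
import Mathlib
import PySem

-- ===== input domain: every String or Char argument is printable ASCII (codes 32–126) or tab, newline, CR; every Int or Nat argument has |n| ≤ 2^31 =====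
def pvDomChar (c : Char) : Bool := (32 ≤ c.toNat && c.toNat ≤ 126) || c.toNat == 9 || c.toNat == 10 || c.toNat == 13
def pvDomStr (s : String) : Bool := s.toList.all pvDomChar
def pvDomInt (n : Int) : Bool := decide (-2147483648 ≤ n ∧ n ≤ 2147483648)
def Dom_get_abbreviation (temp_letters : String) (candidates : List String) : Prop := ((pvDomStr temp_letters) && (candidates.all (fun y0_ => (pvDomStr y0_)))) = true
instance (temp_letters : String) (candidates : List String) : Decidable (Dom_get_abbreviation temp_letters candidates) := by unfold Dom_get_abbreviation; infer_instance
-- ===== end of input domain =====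

-- B scans the candidate lengths longest-first and returns on the first table hit
-- (the original overwrites shorter hits with longer ones); objective: simpler/alternative, same cost.

-- ===== PORT A =====
-- the module-level dict letters_to_be_substituted
def pvSubTable : PySem.Dict String String :=
  PySem.Dict.ofList [("at","@"),("and","&"),("one","1"),("won","1"),("to","2"),
    ("too","2"),("two","2"),("for","4"),("four","4"),("bea","b"),("be","b"),
    ("bee","b"),("sea","c"),("see","c"),("eye","i"),("oh","o"),("owe","o"),
    ("are","r"),("you","u"),("why","y")]

-- temp_letters[0].isupper() — exact for nonempty s (only evaluated after a successful lookup)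
def pvFirstUpper (s : String) : Bool :=
  match PySem.Str.pyGet? s 0 with
  | some c => PySem.Chars.isupper c
  | none => false

-- 'for i in range(min(3, len(candidates))): temp_letters += candidates[i]' visits candidates[:3] in order
def get_abbreviation (temp_letters : String) (candidates : List String) : String × Int :=
  let st := (candidates.take 3).foldl
    (fun (st : String × String × Int) c =>
      let tl := st.1 ++ c
      match pvSubTable.get? (PySem.Str.lower tl) with
      | some v =>
        if v ≠ "" then
          (tl, (if pvFirstUpper tl then PySem.Str.upper v else v), ((PySem.Str.len tl : Int) - 1))
        else (tl, st.2)
      | none => (tl, st.2))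
    (temp_letters, temp_letters, 0)
  st.2

-- ===== PORT B =====
-- the loop body of Source B, over the remaining values of n (a descending range)
def pvAltGo (tl : String) (cands : List String) : List Int → String × Int
  | [] => (tl, 0)
  | n :: rest =>
    let s := tl ++ PySem.Str.join "" (cands.take n.toNat)
    match pvSubTable.get? (PySem.Str.lower s) with
    | some v =>
      if v ≠ "" then
        ((if pvFirstUpper s then PySem.Str.upper v else v), ((PySem.Str.len s : Int) - 1))
      else pvAltGo tl cands rest
    | none => pvAltGo tl cands rest

def get_abbreviation_alt (temp_letters : String) (candidates : List String) : String × Int :=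
  pvAltGo temp_letters candidates (PySem.List.pyRange (min 3 candidates.length) 0 (-1))

-- ===== PRECONDITION & SPEC =====
def Spec_get_abbreviation (temp_letters : String) (candidates : List String) (out : String × Int) : Prop := out = get_abbreviation_alt temp_letters candidates
instance (temp_letters : String) (candidates : List String) (out : String × Int) : Decidable (Spec_get_abbreviation temp_letters candidates out) := by unfold Spec_get_abbreviation; infer_instance

-- ===== CLAIM (what is proved, stated in full; the proofs are below) =====
def Claim_equal_get_abbreviation : Prop := ∀ (temp_letters : String) (candidates : List String), Dom_get_abbreviation temp_letters candidates → Spec_get_abbreviation temp_letters candidates (get_abbreviation temp_letters candidates)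

-- ===== LEMMAS AND PROOFS =====

theorem pvToNat1 : (1 : Int).toNat = 1 := rfl
theorem pvToNat2 : (2 : Int).toNat = 2 := rfl
theorem pvToNat3 : (3 : Int).toNat = 3 := rfl

theorem join1 (a : String) : PySem.Str.join "" [a] = a := by
  apply String.ext
  simp [PySem.Str.toList_join, PySem.Chars.join, List.intercalate]

theorem join2 (a b : String) : PySem.Str.join "" [a, b] = a ++ b := by
  apply String.ext
  simp [PySem.Str.toList_join, PySem.Chars.join, List.intercalate]

theorem join3 (a b c : String) : PySem.Str.join "" [a, b, c] = a ++ b ++ c := by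
  apply String.ext
  simp [PySem.Str.toList_join, PySem.Chars.join, List.intercalate]

-- ===== VERDICT (by name: the statement is the Claim_ definition above) =====
theorem get_abbreviation_spec : Claim_equal_get_abbreviation := by
  intro tl cands _
  unfold Spec_get_abbreviation get_abbreviation get_abbreviation_alt
  match cands with
  | [] => rfl
  | [a] =>
      rw [show (min (3 : Int) (([a] : List String).length : Int)) = 1 by norm_num,
          show PySem.List.pyRange 1 0 (-1) = [1] by decide]
      simp only [pvAltGo, List.take, pvToNat1, join1, List.foldl, ← String.append_assoc]
      cases h1 : pvSubTable.get? (PySem.Str.lower (tl ++ a)) with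
      | none => simp
      | some v1 => by_cases hv : v1 = "" <;> simp [hv]
  | [a, b] =>
      rw [show (min (3 : Int) (([a, b] : List String).length : Int)) = 2 by norm_num,
          show PySem.List.pyRange 2 0 (-1) = [2, 1] by decide]
      simp only [pvAltGo, List.take, pvToNat1, pvToNat2, pvToNat3, join1, join2, List.foldl,
        ← String.append_assoc]
      cases h2 : pvSubTable.get? (PySem.Str.lower (tl ++ a ++ b)) with
      | none =>
        cases h1 : pvSubTable.get? (PySem.Str.lower (tl ++ a)) with
        | none => simp [h1, h2]
        | some v1 => by_cases hv : v1 = "" <;> simp [h1, h2, hv]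
      | some v2 =>
        by_cases hv2 : v2 = ""
        · cases h1 : pvSubTable.get? (PySem.Str.lower (tl ++ a)) with
          | none => simp [h1, h2, hv2]
          | some v1 => by_cases hv : v1 = "" <;> simp [h1, h2, hv, hv2]
        · cases h1 : pvSubTable.get? (PySem.Str.lower (tl ++ a)) with
          | none => simp [h1, h2, hv2]
          | some v1 => by_cases hv : v1 = "" <;> simp [h1, h2, hv, hv2]
  | a :: b :: c :: rest =>
      rw [show min (3 : Int) (((a :: b :: c :: rest).length : Int)) = 3 by
            simp only [List.length_cons]; omega,
          show PySem.List.pyRange 3 0 (-1) = [3, 2, 1] by decide]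
      simp only [pvAltGo, List.take, pvToNat1, pvToNat2, pvToNat3, join1, join2, join3,
        List.foldl, ← String.append_assoc]
      cases h3 : pvSubTable.get? (PySem.Str.lower (tl ++ a ++ b ++ c)) with
      | none =>
        cases h2 : pvSubTable.get? (PySem.Str.lower (tl ++ a ++ b)) with
        | none =>
          cases h1 : pvSubTable.get? (PySem.Str.lower (tl ++ a)) with
          | none => simp [h1, h2, h3]
          | some v1 => by_cases hv : v1 = "" <;> simp [h1, h2, h3, hv]
        | some v2 =>
          by_cases hv2 : v2 = "" <;>
          · cases h1 : pvSubTable.get? (PySem.Str.lower (tl ++ a)) with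
            | none => simp [h1, h2, h3, hv2]
            | some v1 => by_cases hv : v1 = "" <;> simp [h1, h2, h3, hv, hv2]
      | some v3 =>
        by_cases hv3 : v3 = ""
        · cases h2 : pvSubTable.get? (PySem.Str.lower (tl ++ a ++ b)) with
          | none =>
            cases h1 : pvSubTable.get? (PySem.Str.lower (tl ++ a)) with
            | none => simp [h1, h2, h3, hv3]
            | some v1 => by_cases hv : v1 = "" <;> simp [h1, h2, h3, hv, hv3]
          | some v2 =>
            by_cases hv2 : v2 = "" <;>
            · cases h1 : pvSubTable.get? (PySem.Str.lower (tl ++ a)) with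
              | none => simp [h1, h2, h3, hv2, hv3]
              | some v1 => by_cases hv : v1 = "" <;> simp [h1, h2, h3, hv, hv2, hv3]
        · cases h2 : pvSubTable.get? (PySem.Str.lower (tl ++ a ++ b)) with
          | none =>
            cases h1 : pvSubTable.get? (PySem.Str.lower (tl ++ a)) with
            | none => simp [h1, h2, h3, hv3]
            | some v1 => by_cases hv : v1 = "" <;> simp [h1, h2, h3, hv, hv3]
          | some v2 =>
            by_cases hv2 : v2 = "" <;>
            · cases h1 : pvSubTable.get? (PySem.Str.lower (tl ++ a)) with
              | none => simp [h1, h2, h3, hv2, hv3]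
              | some v1 => by_cases hv : v1 = "" <;> simp [h1, h2, h3, hv, hv2, hv3]
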